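-- pv_equiv track=rewrite | github.com/Jianfengliu0413/py2ls | translator.py | merge_strings_every_n
-- ===== SOURCE A (Python) =====
-- def merge_strings_every_n(strings_list, n=10):
--     merged_list = []
--     if n>0:
--         for i in range(0, len(strings_list), n):
--             merged_string = "".join(strings_list[i : i + n])
--             merged_list.append(merged_string)
--         return merged_list,n
--     else:
--         return strings_list,n
-- ===== SOURCE B (Python) =====
-- def merge_strings_every_n(strings_list, n=10):
--     # One incremental pass with a running buffer instead of index-based slicing.
--     if n > 0:
--         result = []
--         buf = []
--         for s in strings_list:
--             buf.append(s)
--             if len(buf) == n: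
--                 result.append("".join(buf))
--                 buf = []
--         if buf:
--             result.append("".join(buf))
--         return result, n
--     else:
--         return strings_list, n
-- ===== Notes on version B (the rewrite author's own statement) =====
-- stated objective: alternative
-- what changed: Replaces the stepped-range loop with index slicing and join-per-slice by a single element-wise pass that accumulates a running buffer and flushes it every n elements (plus a final partial flush).
import Mathlib
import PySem

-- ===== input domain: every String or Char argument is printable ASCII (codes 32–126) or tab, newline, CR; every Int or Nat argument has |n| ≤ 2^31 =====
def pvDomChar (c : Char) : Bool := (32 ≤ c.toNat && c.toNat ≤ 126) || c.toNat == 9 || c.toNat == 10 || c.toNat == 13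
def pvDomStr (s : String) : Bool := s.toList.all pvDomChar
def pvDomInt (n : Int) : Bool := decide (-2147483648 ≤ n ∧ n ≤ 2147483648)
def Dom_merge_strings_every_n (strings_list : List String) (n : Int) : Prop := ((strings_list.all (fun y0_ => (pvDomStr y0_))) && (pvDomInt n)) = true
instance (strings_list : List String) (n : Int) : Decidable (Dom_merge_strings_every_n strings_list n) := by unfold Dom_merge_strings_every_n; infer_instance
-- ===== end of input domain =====

-- B replaces A's stepped-range slice-and-join loop by one element-wise pass with a
-- running buffer flushed every n elements (same cost; objective: alternative decomposition).

-- ===== PORT A =====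
-- for i in range(0, len(strings_list), n): merged_list.append("".join(strings_list[i:i+n]))
def merge_strings_every_n (strings_list : List String) (n : Int) : List String × Int :=
  if n > 0 then
    ((PySem.List.pyRange 0 (strings_list.length : Int) n).foldl
      (fun merged_list i =>
        merged_list ++ [PySem.Str.join "" (PySem.List.slice strings_list (some i) (some (i + n)))])
      [],
     n)
  else
    (strings_list, n)

-- ===== PORT B =====
-- the for-loop of Source B: state (result, buf); append each s to buf, flush at length n
def mergeAltLoop (n : Int) : List String → List String → List String → List String
  | res, buf, [] => if buf.isEmpty then res else res ++ [PySem.Str.join "" buf]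
  | res, buf, s :: rest =>
    if ((buf ++ [s]).length : Int) = n then
      mergeAltLoop n (res ++ [PySem.Str.join "" (buf ++ [s])]) [] rest
    else
      mergeAltLoop n res (buf ++ [s]) rest

def merge_strings_every_n_alt (strings_list : List String) (n : Int) : List String × Int :=
  if n > 0 then
    (mergeAltLoop n [] [] strings_list, n)
  else
    (strings_list, n)

-- ===== PRECONDITION & SPEC =====
def Spec_merge_strings_every_n (strings_list : List String) (n : Int) (out : List String × Int) : Prop := out = merge_strings_every_n_alt strings_list n
instance (strings_list : List String) (n : Int) (out : List String × Int) : Decidable (Spec_merge_strings_every_n strings_list n out) := by unfold Spec_merge_strings_every_n; infer_instance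

-- ===== CLAIM (what is proved, stated in full; the proofs are below) =====
def Claim_equal_merge_strings_every_n : Prop := ∀ (strings_list : List String) (n : Int), Dom_merge_strings_every_n strings_list n → Spec_merge_strings_every_n strings_list n (merge_strings_every_n strings_list n)

-- ===== LEMMAS AND PROOFS =====

-- proof-only reference: the groups of (m+1) consecutive elements
def pvChunks (m : Nat) : List String → List (List String)
  | [] => []
  | x :: rest => (x :: rest.take m) :: pvChunks m (rest.drop m)
termination_by xs => xs.length
decreasing_by simp

-- range(0, b, n) for 0 < b peels off 0 and shifts the rest down by n
lemma pyRange_zero_step (n b : Int) (hn : 0 < n) (hb : 0 < b) :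
    PySem.List.pyRange 0 b n = 0 :: (PySem.List.pyRange 0 (b - n) n).map (· + n) := by
  rw [PySem.List.pyRange_of_pos 0 b hn, PySem.List.pyRange_of_pos 0 (b - n) hn]
  have h2 : 0 ≤ (b - 1) / n := Int.ediv_nonneg (by omega) hn.le
  have hcnt : (if (0:Int) < b then ((b - 0 + n - 1) / n).toNat else 0) = ((b - 1) / n).toNat + 1 := by
    rw [if_pos hb]
    have h1 : (b - 0 + n - 1) / n = (b - 1) / n + 1 := by
      rw [show b - 0 + n - 1 = (b - 1) + 1 * n by ring, Int.add_mul_ediv_right _ _ (ne_of_gt hn)]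
    omega
  have htail : (if (0:Int) < b - n then ((b - n - 0 + n - 1) / n).toNat else 0) = ((b - 1) / n).toNat := by
    split_ifs with h
    · congr 1; congr 1; ring
    · have : (b - 1) / n = 0 := Int.ediv_eq_zero_of_lt (by omega) (by omega)
      simp [this]
  rw [hcnt, htail, List.range_succ_eq_map, List.map_cons, List.map_map, List.map_map]
  congr 1
  · norm_num
  · apply List.map_congr_left
    intro k _
    simp only [Function.comp]
    push_cast
    ring

lemma pyRange_nonpos_nil (n b : Int) (hn : 0 < n) (hb : b ≤ 0) :
    PySem.List.pyRange 0 b n = [] := by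
  rw [PySem.List.pyRange_of_pos 0 b hn, if_neg (by omega)]
  simp

-- A's per-index body, after peeling the first chunk, is B's body on the dropped list
lemma slice_shift (xs : List String) (n i : Int) (hn : 0 < n) (hi : 0 ≤ i) :
    PySem.List.slice xs (some (i + n)) (some (i + n + n)) =
    PySem.List.slice (xs.drop n.toNat) (some i) (some (i + n)) := by
  rw [PySem.List.slice_toNat xs (by omega) (by omega),
      PySem.List.slice_toNat (xs.drop n.toNat) hi (by omega)]
  have h1 : (i + n).toNat = n.toNat + i.toNat := by omega
  rw [h1, ← List.drop_drop]
  congr 1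
  omega

-- A's map over the stepped range produces exactly the joined chunks
lemma a_side (n : Int) (hn : 0 < n) (xs : List String) :
    (PySem.List.pyRange 0 (xs.length : Int) n).map
      (fun i => PySem.Str.join "" (PySem.List.slice xs (some i) (some (i + n)))) =
    (pvChunks (n.toNat - 1) xs).map (PySem.Str.join "") := by
  induction xs using pvChunks.induct (m := n.toNat - 1) with
  | case1 =>
    rw [pyRange_nonpos_nil n _ hn (by simp)]
    simp [pvChunks]
  | case2 x rest ih =>
    have hL : 0 < ((x :: rest).length : Int) := by simp
    rw [pyRange_zero_step n _ hn hL, List.map_cons, List.map_map]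
    have hdrop : (x :: rest).drop n.toNat = rest.drop (n.toNat - 1) := by
      have h1 : n.toNat = (n.toNat - 1) + 1 := by omega
      rw [h1]; rfl
    have hhead : PySem.Str.join "" (PySem.List.slice (x :: rest) (some 0) (some (0 + n))) =
        PySem.Str.join "" (x :: rest.take (n.toNat - 1)) := by
      congr 1
      rw [PySem.List.slice_toNat _ le_rfl (by omega)]
      simp only [zero_add, Int.toNat_zero, List.drop_zero, Nat.sub_zero]
      obtain ⟨m, hm⟩ : ∃ m, n.toNat = m + 1 := ⟨n.toNat - 1, by omega⟩
      rw [hm]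
      simp
    have htail : ((PySem.List.pyRange 0 (((x :: rest).length : Int) - n) n).map
        ((fun i => PySem.Str.join "" (PySem.List.slice (x :: rest) (some i) (some (i + n)))) ∘ (· + n))) =
        (pvChunks (n.toNat - 1) (rest.drop (n.toNat - 1))).map (PySem.Str.join "") := by
      have h0 : ((x :: rest).length : Int) = (rest.length : Int) + 1 := by simp
      by_cases hshort : ((x :: rest).length : Int) ≤ n
      · rw [pyRange_nonpos_nil n _ hn (by omega)]
        have hnil : rest.drop (n.toNat - 1) = [] := by
          apply List.drop_eq_nil_of_le
          omega
        simp [hnil, pvChunks]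
      · have hlen : (((rest.drop (n.toNat - 1)).length : Int)) = ((x :: rest).length : Int) - n := by
          simp; omega
        rw [← ih, ← hlen]
        apply List.map_congr_left
        intro i hi
        have h0i : 0 ≤ i := ((PySem.List.mem_pyRange_iff_of_pos hn i).mp hi).1
        simp only [Function.comp]
        congr 1
        rw [slice_shift (x :: rest) n i hn h0i, hdrop]
    rw [hhead, htail]
    simp [pvChunks]

-- B's loop consumes exactly the k elements missing from the current buffer
lemma b_consume (n : Int) :
    ∀ (xs buf res : List String) (k : Nat), buf.length + k = n.toNat → 0 < k →
      (buf = [] → xs ≠ []) →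
      mergeAltLoop n res buf xs =
        if xs.length < k then res ++ [PySem.Str.join "" (buf ++ xs)]
        else mergeAltLoop n (res ++ [PySem.Str.join "" (buf ++ xs.take k)]) [] (xs.drop k)
  | [], buf, res, k, hk, hkpos, hne => by
    have hb : buf ≠ [] := fun h => (hne h) rfl
    rw [if_pos (by simpa using hkpos)]
    simp [mergeAltLoop, List.isEmpty_iff, hb]
  | s :: rest, buf, res, k, hk, hkpos, _ => by
    simp only [mergeAltLoop]
    by_cases hflush : (((buf ++ [s]).length : Int)) = n
    · rw [if_pos hflush]
      have hk1 : k = 1 := by simp at hflush; omega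
      subst hk1
      rw [if_neg (by simp)]
      simp
    · rw [if_neg hflush]
      have hk2 : 2 ≤ k := by
        rcases Nat.lt_or_ge k 2 with h | h
        · interval_cases k
          exact absurd (by simp; omega : ((buf ++ [s]).length : Int) = n) hflush
        · exact h
      rw [b_consume n rest (buf ++ [s]) res (k - 1) (by simp; omega) (by omega) (by simp)]
      have hiff : rest.length < k - 1 ↔ (s :: rest).length < k := by simp; omega
      by_cases hcase : rest.length < k - 1
      · rw [if_pos hcase, if_pos (hiff.mp hcase)]
        simp
      · rw [if_neg hcase, if_neg (fun h => hcase (hiff.mpr h))]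
        have htake : buf ++ [s] ++ rest.take (k - 1) = buf ++ (s :: rest).take k := by
          rw [show k = (k - 1) + 1 by omega]
          simp
        have hdrop : rest.drop (k - 1) = (s :: rest).drop k := by
          rw [show k = (k - 1) + 1 by omega]
          rfl
        rw [htake, hdrop]

-- starting from an empty buffer, B's loop appends the joined chunks
lemma b_chunks (n : Int) (hn : 0 < n) (xs : List String) :
    ∀ res, mergeAltLoop n res [] xs = res ++ (pvChunks (n.toNat - 1) xs).map (PySem.Str.join "") := by
  induction xs using pvChunks.induct (m := n.toNat - 1) with
  | case1 =>
    intro res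
    simp [mergeAltLoop, pvChunks]
  | case2 x rest ih =>
    intro res
    rw [b_consume n (x :: rest) [] res n.toNat (by simp) (by omega) (fun _ => by simp)]
    have htk : (x :: rest).take n.toNat = x :: rest.take (n.toNat - 1) := by
      rw [show n.toNat = (n.toNat - 1) + 1 by omega]; rfl
    have hdr : (x :: rest).drop n.toNat = rest.drop (n.toNat - 1) := by
      rw [show n.toNat = (n.toNat - 1) + 1 by omega]; rfl
    by_cases hshort : (x :: rest).length < n.toNat
    · rw [if_pos hshort]
      have h1 : rest.drop (n.toNat - 1) = [] := by
        apply List.drop_eq_nil_of_le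
        simp at hshort ⊢; omega
      have h2 : rest.take (n.toNat - 1) = rest := by
        apply List.take_of_length_le
        simp at hshort; omega
      simp [pvChunks, h1, h2]
    · rw [if_neg hshort, htk, hdr, ih]
      simp [pvChunks]

-- ===== VERDICT (by name: the statement is the Claim_ definition above) =====
theorem merge_strings_every_n_spec : Claim_equal_merge_strings_every_n := by
  intro strings_list n _
  unfold Spec_merge_strings_every_n merge_strings_every_n merge_strings_every_n_alt
  by_cases hn : n > 0
  · rw [if_pos hn, if_pos hn]
    rw [PySem.List.foldl_append_singleton_eq_map, List.nil_append,
        a_side n hn strings_list, b_chunks n hn strings_list [], List.nil_append]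
  · rw [if_neg hn, if_neg hn]
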